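-- pv_equiv track=rewrite | github.com/iproha94/contests | 1138/a.py | f
-- ===== SOURCE A (Python) =====
-- def f(n, a_arr):
--     if a_arr[0] == 1:
--         now_length_1 = 1
--         now_length_2 = 0
--     else:
--         now_length_1 = 0
--         now_length_2 = 1
--
--     max_length = 1
--
--     for i in range(1, n):
--         if a_arr[i - 1] == a_arr[i]:
--             if a_arr[i] == 1:
--                 now_length_1 += 1
--             else:
--                 now_length_2 += 1
--         elif a_arr[i] == 1:
--             now_length_1 = 1
--         else:
--             now_length_2 = 1
--
--         max_length = max(max_length, min(now_length_1, now_length_2))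
--
--     return max_length * 2
-- ===== SOURCE B (Python) =====
-- def f(n, a_arr):
--     # Run-length encode the first n elements, then scan adjacent runs keeping
--     # the last run length of each class; the max is seeded at 1 so fewer than
--     # two runs still yields 2.
--     cur = a_arr[0]
--     cnt = 0
--     runs = []
--     for i in range(n):
--         x = a_arr[i]
--         if cnt > 0 and x == cur:
--             cnt += 1
--         else:
--             if cnt > 0:
--                 runs.append((cur, cnt))
--             cur, cnt = x, 1
--     if cnt > 0:
--         runs.append((cur, cnt))
--     best = 1
--     len1 = 0
--     len2 = 0
--     for v, ln in runs:
--         if v == 1: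
--             len1 = ln
--         else:
--             len2 = ln
--         best = max(best, min(len1, len2))
--     return best * 2
-- ===== Notes on version B (the rewrite author's own statement) =====
-- stated objective: alternative
-- what changed: Replaces A's fused single pass with two mutable run counters by an explicit run-length encoding of the first n elements followed by a separate scan over the runs keeping the last run length of each class.
import Mathlib
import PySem

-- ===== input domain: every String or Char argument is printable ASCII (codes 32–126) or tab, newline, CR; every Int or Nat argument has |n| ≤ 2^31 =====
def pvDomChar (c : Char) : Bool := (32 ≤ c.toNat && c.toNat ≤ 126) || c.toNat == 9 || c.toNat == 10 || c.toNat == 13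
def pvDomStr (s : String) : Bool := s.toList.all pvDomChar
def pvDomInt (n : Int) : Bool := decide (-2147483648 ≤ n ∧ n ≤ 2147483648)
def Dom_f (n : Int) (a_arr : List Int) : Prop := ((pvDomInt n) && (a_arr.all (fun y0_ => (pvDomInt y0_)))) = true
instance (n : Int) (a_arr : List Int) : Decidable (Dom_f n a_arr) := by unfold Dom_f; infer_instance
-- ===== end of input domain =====

-- B replaces A's fused two-counter pass by an explicit run-length encoding of the
-- first n elements plus a separate scan over the runs (objective: alternative).

-- ===== PORT A =====
-- loop body of A's 'for i in range(1, n)'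
def fStep (a_arr : List Int) (s : Int × Int × Int) (i : Int) : Int × Int × Int :=
  let prev := PySem.List.pyGetD a_arr (i - 1) 0
  let x := PySem.List.pyGetD a_arr i 0
  let p := if prev == x then (if x == 1 then (s.1 + 1, s.2.1) else (s.1, s.2.1 + 1))
           else if x == 1 then ((1 : Int), s.2.1) else (s.1, (1 : Int))
  (p.1, p.2, max s.2.2 (min p.1 p.2))

def f (n : Int) (a_arr : List Int) : Int :=
  let init : Int × Int :=
    if PySem.List.pyGetD a_arr 0 0 == 1 then (1, 0) else (0, 1)
  let st := (PySem.List.pyRange 1 n 1).foldl (fStep a_arr) (init.1, init.2, 1)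
  st.2.2 * 2

-- ===== PORT B =====
-- loop body of B's run-length-encoding pass (state: runs, cur, cnt)
def bRleStep (s : List (Int × Int) × Int × Int) (x : Int) : List (Int × Int) × Int × Int :=
  if s.2.2 > 0 && x == s.2.1 then (s.1, s.2.1, s.2.2 + 1)
  else ((if s.2.2 > 0 then s.1 ++ [(s.2.1, s.2.2)] else s.1), x, 1)

-- loop body of B's scan over the runs (state: best, len1, len2)
def bScanStep (s : Int × Int × Int) (r : Int × Int) : Int × Int × Int :=
  let l := if r.1 == 1 then (r.2, s.2.2) else (s.2.1, r.2)
  (max s.1 (min l.1 l.2), l.1, l.2)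

def f_alt (n : Int) (a_arr : List Int) : Int :=
  let st := (PySem.List.pyRange 0 n 1).foldl
    (fun s i => bRleStep s (PySem.List.pyGetD a_arr i 0))
    ([], PySem.List.pyGetD a_arr 0 0, 0)
  let runs := if st.2.2 > 0 then st.1 ++ [(st.2.1, st.2.2)] else st.1
  (runs.foldl bScanStep (1, 0, 0)).1 * 2

-- ===== PRECONDITION & SPEC =====
-- A raises IndexError on an empty list (a_arr[0]) and whenever n > len(a_arr)
-- (the loop reads a_arr[i] for i < n); exactly those inputs are excluded.
def Pre_f (n : Int) (a_arr : List Int) : Prop := a_arr ≠ [] ∧ n ≤ (a_arr.length : Int)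
instance (n : Int) (a_arr : List Int) : Decidable (Pre_f n a_arr) := by unfold Pre_f; infer_instance
def pvWitness_f : Int × List Int := (3, [1, 1, 2])

def Spec_f (n : Int) (a_arr : List Int) (out : Int) : Prop := out = f_alt n a_arr
instance (n : Int) (a_arr : List Int) (out : Int) : Decidable (Spec_f n a_arr out) := by unfold Spec_f; infer_instance

-- ===== CLAIM (what is proved, stated in full; the proofs are below) =====
def Claim_equal_f : Prop := ∀ (n : Int) (a_arr : List Int), Dom_f n a_arr → Pre_f n a_arr → Spec_f n a_arr (f n a_arr)

-- ===== LEMMAS AND PROOFS =====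

-- definitional unfoldings of the two ports (zeta-reduced forms)
lemma f_eq (n : Int) (a : List Int) :
    f n a = ((PySem.List.pyRange 1 n 1).foldl (fStep a)
      ((if PySem.List.pyGetD a 0 0 == 1 then ((1 : Int), (0 : Int)) else (0, 1)).1,
       (if PySem.List.pyGetD a 0 0 == 1 then ((1 : Int), (0 : Int)) else (0, 1)).2, 1)).2.2 * 2 := rfl

lemma f_alt_eq (n : Int) (a : List Int) :
    f_alt n a =
      ((if ((PySem.List.pyRange 0 n 1).foldl
              (fun s i => bRleStep s (PySem.List.pyGetD a i 0))
              ([], PySem.List.pyGetD a 0 0, 0)).2.2 > 0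
         then ((PySem.List.pyRange 0 n 1).foldl
              (fun s i => bRleStep s (PySem.List.pyGetD a i 0))
              ([], PySem.List.pyGetD a 0 0, 0)).1
              ++ [(((PySem.List.pyRange 0 n 1).foldl
              (fun s i => bRleStep s (PySem.List.pyGetD a i 0))
              ([], PySem.List.pyGetD a 0 0, 0)).2.1,
                   ((PySem.List.pyRange 0 n 1).foldl
              (fun s i => bRleStep s (PySem.List.pyGetD a i 0))
              ([], PySem.List.pyGetD a 0 0, 0)).2.2)]
         else ((PySem.List.pyRange 0 n 1).foldl
              (fun s i => bRleStep s (PySem.List.pyGetD a i 0))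
              ([], PySem.List.pyGetD a 0 0, 0)).1).foldl
        bScanStep (1, 0, 0)).1 * 2 := rfl

-- abstract form of A's loop: prev, remaining elements, state (n1, n2, m)
def aLoop : Int → List Int → Int × Int × Int → Int × Int × Int
  | _, [], s => s
  | prev, x :: xs, s =>
    let p := if prev == x then (if x == 1 then (s.1 + 1, s.2.1) else (s.1, s.2.1 + 1))
             else if x == 1 then ((1 : Int), s.2.1) else (s.1, (1 : Int))
    aLoop x xs (p.1, p.2, max s.2.2 (min p.1 p.2))

-- the runs B's RLE pass still has to emit, given pending run (cur, cnt)
def bRest : Int → Int → List Int → List (Int × Int)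
  | cur, cnt, [] => [(cur, cnt)]
  | cur, cnt, x :: xs => if x == cur then bRest cur (cnt + 1) xs else (cur, cnt) :: bRest x 1 xs

lemma aLoop_cons (prev x : Int) (xs : List Int) (s : Int × Int × Int) :
    aLoop prev (x :: xs) s
    = aLoop x xs
        ((if prev == x then (if x == 1 then (s.1 + 1, s.2.1) else (s.1, s.2.1 + 1))
          else if x == 1 then ((1 : Int), s.2.1) else (s.1, (1 : Int))).1,
         (if prev == x then (if x == 1 then (s.1 + 1, s.2.1) else (s.1, s.2.1 + 1))
          else if x == 1 then ((1 : Int), s.2.1) else (s.1, (1 : Int))).2,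
         max s.2.2 (min (if prev == x then (if x == 1 then (s.1 + 1, s.2.1) else (s.1, s.2.1 + 1))
            else if x == 1 then ((1 : Int), s.2.1) else (s.1, (1 : Int))).1
          (if prev == x then (if x == 1 then (s.1 + 1, s.2.1) else (s.1, s.2.1 + 1))
            else if x == 1 then ((1 : Int), s.2.1) else (s.1, (1 : Int))).2)) := rfl

-- B's RLE fold, started on a pending run, produces acc ++ bRest cur cnt xs
lemma rle_eq_bRest (xs : List Int) : ∀ (acc : List (Int × Int)) (cur cnt : Int), 0 < cnt →
    (if (xs.foldl bRleStep (acc, cur, cnt)).2.2 > 0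
      then (xs.foldl bRleStep (acc, cur, cnt)).1 ++ [((xs.foldl bRleStep (acc, cur, cnt)).2.1, (xs.foldl bRleStep (acc, cur, cnt)).2.2)]
      else (xs.foldl bRleStep (acc, cur, cnt)).1)
    = acc ++ bRest cur cnt xs := by
  induction xs with
  | nil =>
    intro acc cur cnt hcnt
    simp [List.foldl, bRest, hcnt]
  | cons x xs ih =>
    intro acc cur cnt hcnt
    simp only [List.foldl_cons]
    by_cases hx : x = cur
    · have hstep : bRleStep (acc, cur, cnt) x = (acc, cur, cnt + 1) := by
        simp [bRleStep, hcnt, hx]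
      rw [hstep, ih acc cur (cnt + 1) (by omega)]
      simp [bRest, hx]
    · have hstep : bRleStep (acc, cur, cnt) x = (acc ++ [(cur, cnt)], x, 1) := by
        simp [bRleStep, hx, hcnt]
      rw [hstep, ih (acc ++ [(cur, cnt)]) x 1 (by omega)]
      simp [bRest, hx]

-- key invariant: B's scan over the remaining runs equals A's loop over the
-- remaining elements, with A's counters holding the pending run length
lemma scan_bRest (xs : List Int) : ∀ (cur cnt best l1 l2 : Int),
    ((bRest cur cnt xs).foldl bScanStep (best, l1, l2)).1
    = (aLoop cur xs ((if cur == 1 then cnt else l1), (if cur == 1 then l2 else cnt),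
        max best (min (if cur == 1 then cnt else l1) (if cur == 1 then l2 else cnt)))).2.2 := by
  induction xs with
  | nil =>
    intro cur cnt best l1 l2
    by_cases hc : cur = 1 <;> simp [bRest, bScanStep, aLoop, hc]
  | cons x xs ih =>
    intro cur cnt best l1 l2
    by_cases hx : x = cur
    · subst hx
      rw [show bRest x cnt (x :: xs) = bRest x (cnt + 1) xs from by simp [bRest]]
      rw [ih x (cnt + 1) best l1 l2]
      by_cases hc : x = 1
      · have harith : max (max best (min cnt l2)) (min (cnt + 1) l2)
            = max best (min (cnt + 1) l2) := by omega
        simp [aLoop, hc, harith]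
      · have harith : max (max best (min l1 cnt)) (min l1 (cnt + 1))
            = max best (min l1 (cnt + 1)) := by omega
        simp [aLoop, hc, harith]
    · have hne : (cur == x) = false := beq_eq_false_iff_ne.mpr (Ne.symm hx)
      have hb : bScanStep (best, l1, l2) (cur, cnt)
          = (max best (min (if cur == 1 then cnt else l1) (if cur == 1 then l2 else cnt)),
             (if cur == 1 then cnt else l1), (if cur == 1 then l2 else cnt)) := by
        by_cases h : cur = 1 <;> simp [bScanStep, h]
      rw [show bRest cur cnt (x :: xs) = (cur, cnt) :: bRest x 1 xs from by simp [bRest, hx],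
          List.foldl_cons, hb, ih x 1 _ _ _]
      by_cases hx1 : x = 1
      · subst hx1
        simp [aLoop, hne]
      · have h1 : (x == 1) = false := beq_eq_false_iff_ne.mpr hx1
        simp [aLoop, hne, h1]

-- A's index fold over range(i, n) equals aLoop over the elements a[i:n]
lemma idx_eq_aLoop (a : List Int) (n : Int) (hn : n ≤ (a.length : Int)) :
    ∀ (k i : Nat), 1 ≤ i → n.toNat - i ≤ k → ∀ (s : Int × Int × Int),
    (PySem.List.pyRange (i : Int) n 1).foldl (fStep a) s
    = aLoop (a.getD (i - 1) 0) ((a.take n.toNat).drop i) s := by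
  intro k
  induction k with
  | zero =>
    intro i hi hk s
    have h1 : PySem.List.pyRange (i : Int) n 1 = [] := PySem.List.pyRange_one_eq_nil (by omega)
    have h2 : (a.take n.toNat).drop i = [] := by
      apply List.drop_eq_nil_of_le
      simp [List.length_take]
      omega
    rw [h1, h2]
    rfl
  | succ k ih =>
    intro i hi hk s
    by_cases hlt : (i : Int) < n
    · have hi_len : i < a.length := by omega
      have hi_take : i < (a.take n.toNat).length := by
        simp [List.length_take]
        omega
      rw [PySem.List.pyRange_one_cons hlt, List.foldl_cons]
      rw [show (i : Int) + 1 = ((i + 1 : Nat) : Int) from by omega]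
      rw [ih (i + 1) (by omega) (by omega) (fStep a s i)]
      rw [List.drop_eq_getElem_cons hi_take, List.getElem_take]
      have hprev : PySem.List.pyGetD a ((i : Int) - 1) 0 = a.getD (i - 1) 0 := by
        rw [show (i : Int) - 1 = ((i - 1 : Nat) : Int) from by omega, PySem.List.pyGetD_natCast]
      have hx : PySem.List.pyGetD a (i : Int) 0 = a[i] := by
        rw [PySem.List.pyGetD_natCast]
        exact PySem.List.getD_eq_getElem_of_lt a i 0 hi_len
      have hgd : a.getD (i + 1 - 1) 0 = a[i] := by
        rw [show i + 1 - 1 = i from rfl]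
        exact PySem.List.getD_eq_getElem_of_lt a i 0 hi_len
      rw [hgd, aLoop_cons]
      simp only [fStep, hprev, hx]
    · have h1 : PySem.List.pyRange (i : Int) n 1 = [] := PySem.List.pyRange_one_eq_nil (by omega)
      have h2 : (a.take n.toNat).drop i = [] := by
        apply List.drop_eq_nil_of_le
        simp [List.length_take]
        omega
      rw [h1, h2]
      rfl

-- B's index fold over range(i, n) equals the bRleStep fold over the elements a[i:n]
lemma idx_eq_rle (a : List Int) (n : Int) (hn : n ≤ (a.length : Int)) :
    ∀ (k i : Nat), n.toNat - i ≤ k → ∀ (s : List (Int × Int) × Int × Int),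
    (PySem.List.pyRange (i : Int) n 1).foldl
        (fun s j => bRleStep s (PySem.List.pyGetD a j 0)) s
    = ((a.take n.toNat).drop i).foldl bRleStep s := by
  intro k
  induction k with
  | zero =>
    intro i hk s
    have h1 : PySem.List.pyRange (i : Int) n 1 = [] := PySem.List.pyRange_one_eq_nil (by omega)
    have h2 : (a.take n.toNat).drop i = [] := by
      apply List.drop_eq_nil_of_le
      simp [List.length_take]
      omega
    rw [h1, h2]; rfl
  | succ k ih =>
    intro i hk s
    by_cases hlt : (i : Int) < n
    · have hi_len : i < a.length := by omega
      have hi_take : i < (a.take n.toNat).length := by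
        simp [List.length_take]
        omega
      rw [PySem.List.pyRange_one_cons hlt, List.foldl_cons]
      rw [show (i : Int) + 1 = ((i + 1 : Nat) : Int) from by omega]
      rw [ih (i + 1) (by omega)]
      rw [List.drop_eq_getElem_cons hi_take, List.getElem_take, List.foldl_cons]
      have hx : PySem.List.pyGetD a (i : Int) 0 = a[i] := by
        rw [PySem.List.pyGetD_natCast]
        exact PySem.List.getD_eq_getElem_of_lt a i 0 hi_len
      rw [hx]
    · have h1 : PySem.List.pyRange (i : Int) n 1 = [] := PySem.List.pyRange_one_eq_nil (by omega)
      have h2 : (a.take n.toNat).drop i = [] := by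
        apply List.drop_eq_nil_of_le
        simp [List.length_take]
        omega
      rw [h1, h2]; rfl

-- ===== VERDICT (by name: the statement is the Claim_ definition above) =====
theorem f_spec : Claim_equal_f := by
  intro n a hdom hpre
  obtain ⟨hne, hlen⟩ := hpre
  unfold Spec_f
  obtain ⟨a0, rest, rfl⟩ : ∃ a0 rest, a = a0 :: rest := by
    cases a with
    | nil => exact absurd rfl hne
    | cons a0 rest => exact ⟨a0, rest, rfl⟩
  by_cases hn : n ≤ 0
  · have h1 : PySem.List.pyRange 1 n 1 = [] := PySem.List.pyRange_one_eq_nil (by omega)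
    have h0 : PySem.List.pyRange 0 n 1 = [] := PySem.List.pyRange_one_eq_nil (by omega)
    rw [f_eq, f_alt_eq, h1, h0]
    simp
  · have hn' : 0 < n := by omega
    have hn1 : 1 ≤ n.toNat := by omega
    -- the shared tail: elements 1 .. n-1 of the list
    obtain ⟨T, hT⟩ : ∃ T : List Int, T = rest.take (n.toNat - 1) := ⟨_, rfl⟩
    have htake : (a0 :: rest).take n.toNat = a0 :: T := by
      rw [show n.toNat = (n.toNat - 1) + 1 from by omega, hT]
      rfl
    -- A side
    have hA : f n (a0 :: rest)
        = (aLoop a0 T ((if a0 == 1 then ((1:Int),(0:Int)) else (0,1)).1,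
            (if a0 == 1 then ((1:Int),(0:Int)) else (0,1)).2, 1)).2.2 * 2 := by
      have hidx := idx_eq_aLoop (a0 :: rest) n (by simpa using hlen) (n.toNat - 1) 1 (by omega) (by omega)
      simp only [show ((1 : Nat) : Int) = 1 from rfl] at hidx
      rw [f_eq, hidx]
      simp [htake, PySem.List.pyGetD_zero_cons]
    -- B side
    have hidxB := idx_eq_rle (a0 :: rest) n (by simpa using hlen) n.toNat 0 (by omega)
    simp only [show ((0 : Nat) : Int) = 0 from rfl, List.drop_zero] at hidxB
    have hfirst : bRleStep ([], PySem.List.pyGetD (a0 :: rest) 0 0, 0) a0 = ([], a0, 1) := by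
      simp [bRleStep]
    have hB : f_alt n (a0 :: rest)
        = ((bRest a0 1 T).foldl bScanStep (1, 0, 0)).1 * 2 := by
      rw [f_alt_eq, hidxB, htake, List.foldl_cons, hfirst, rle_eq_bRest T [] a0 1 (by omega)]
      simp
    rw [hA, hB, scan_bRest T a0 1 1 0 0]
    by_cases hc : a0 = 1
    · simp [hc]
    · simp [hc]
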